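-- pv_equiv track=rewrite | github.com/bhumilshah26/cn | classful_ip.py | generate
-- ===== SOURCE A (Python) =====
-- def generate(data):
--     data = [int(octet) for octet in data]
--     ip_class = ''
--     subnet_mask = ''
--
--     ip_classes = [
--         ((0, 127), 'A', '255.0.0.0'),
--         ((128, 191), 'B', '255.255.0.0'),
--         ((192, 223), 'C', '255.255.255.0'),
--         ((224, 239), 'D', None),
--         ((240, 255), 'E', None)
--     ]
--
--     for ((start, end), clas, sm) in ip_classes:
--         if start <= data[0] <= end:
--             ip_class = clas
--             subnet_mask = sm
--             break
--
--     return ip_class, subnet_mask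
-- ===== SOURCE B (Python) =====
-- def generate(data):
--     data = [int(octet) for octet in data]
--     first = data[0]
--     if not 0 <= first <= 255:
--         return '', ''
--     cls = 'AAAAAAAABBBBCCDE'[first >> 4]
--     masks = {'A': '255.0.0.0', 'B': '255.255.0.0',
--              'C': '255.255.255.0', 'D': None, 'E': None}
--     return cls, masks[cls]
-- ===== Notes on version B (the rewrite author's own statement) =====
-- stated objective: simpler
-- what changed: Replaced the five-range scan with a direct lookup: after validating the octet, the class letter is read from a 16-entry string indexed by the octet's high nibble and its mask from a dict.
import Mathlib
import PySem

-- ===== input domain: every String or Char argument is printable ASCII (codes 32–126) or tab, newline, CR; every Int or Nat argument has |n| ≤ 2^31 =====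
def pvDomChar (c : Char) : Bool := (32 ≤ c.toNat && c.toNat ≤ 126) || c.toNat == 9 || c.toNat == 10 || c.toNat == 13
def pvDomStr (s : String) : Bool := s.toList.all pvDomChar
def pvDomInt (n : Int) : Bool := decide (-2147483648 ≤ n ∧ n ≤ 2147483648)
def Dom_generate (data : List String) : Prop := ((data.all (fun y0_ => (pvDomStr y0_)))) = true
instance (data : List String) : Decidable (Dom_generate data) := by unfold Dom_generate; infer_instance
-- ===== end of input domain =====

-- B replaces A's five-range scan with a direct lookup: class letter from a 16-entry string indexed by the octet's high nibble, mask from a dict (objective: simpler).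


-- ===== PORT A =====
-- the for-loop over ip_classes with break: first matching range wins
def findClass (f : Int) : List ((Int × Int) × String × Option String) → String × Option String
  | [] => ("", some "")
  | ((s, e), clas, sm) :: rest =>
      if s ≤ f ∧ f ≤ e then (clas, sm) else findClass f rest

def generate (data : List String) : String × Option String :=
  match data.mapM PySem.Int.ofStr? with
  | none => ("", none)            -- int() raises ValueError: excluded by Pre_
  | some ints =>
      match PySem.List.pyGet? ints 0 with
      | none => ("", none)        -- data[0] raises IndexError: excluded by Pre_
      | some f =>
          findClass f
            [((0, 127), "A", some "255.0.0.0"),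
             ((128, 191), "B", some "255.255.0.0"),
             ((192, 223), "C", some "255.255.255.0"),
             ((224, 239), "D", none),
             ((240, 255), "E", none)]

-- ===== PORT B =====
def generate_alt (data : List String) : String × Option String :=
  match data.mapM PySem.Int.ofStr? with
  | none => ("", none)            -- int() raises ValueError: excluded by Pre_
  | some ints =>
      match PySem.List.pyGet? ints 0 with
      | none => ("", none)        -- data[0] raises IndexError: excluded by Pre_
      | some first =>
          if ¬ (0 ≤ first ∧ first ≤ 255) then ("", some "")
          else
            match PySem.Str.pyGet? "AAAAAAAABBBBCCDE" (first >>> 4) with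
            | none => ("", none)  -- unreachable: 0 ≤ first>>4 ≤ 15
            | some c =>
                let cls := String.ofList [c]
                let masks : PySem.Dict String (Option String) :=
                  PySem.Dict.ofList
                    [("A", some "255.0.0.0"), ("B", some "255.255.0.0"),
                     ("C", some "255.255.255.0"), ("D", none), ("E", none)]
                match PySem.Dict.get? masks cls with
                | none => ("", none)  -- unreachable KeyError guard
                | some sm => (cls, sm)

-- ===== PRECONDITION & SPEC =====
-- Pre_ excludes exactly the inputs where A raises: an empty list (IndexError on data[0])
-- and lists containing a string int() rejects (ValueError).
def Pre_generate (data : List String) : Prop :=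
  data ≠ [] ∧ ∀ s ∈ data, (PySem.Int.ofStr? s).isSome = true
instance (data : List String) : Decidable (Pre_generate data) := by unfold Pre_generate; infer_instance
def pvWitness_generate : List String := ["127", "92", "124"]

def Spec_generate (data : List String) (out : String × Option String) : Prop := out = generate_alt data
instance (data : List String) (out : String × Option String) : Decidable (Spec_generate data out) := by unfold Spec_generate; infer_instance

-- ===== CLAIM (what is proved, stated in full; the proofs are below) =====
def Claim_equal_generate : Prop := ∀ (data : List String), Dom_generate data → Pre_generate data → Spec_generate data (generate data)

-- ===== LEMMAS AND PROOFS =====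

-- core: on every Int first octet the range scan equals B's nibble-lookup computation
set_option maxRecDepth 8000 in
theorem findClass_eq_lookup (f : Int) :
    findClass f
      [((0, 127), "A", some "255.0.0.0"),
       ((128, 191), "B", some "255.255.0.0"),
       ((192, 223), "C", some "255.255.255.0"),
       ((224, 239), "D", none),
       ((240, 255), "E", none)] =
    (if ¬ (0 ≤ f ∧ f ≤ 255) then (("", some "") : String × Option String)
     else
       match PySem.Str.pyGet? "AAAAAAAABBBBCCDE" (f >>> 4) with
       | none => ("", none)
       | some c =>
           let cls := String.ofList [c]
           let masks : PySem.Dict String (Option String) :=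
             PySem.Dict.ofList
               [("A", some "255.0.0.0"), ("B", some "255.255.0.0"),
                ("C", some "255.255.255.0"), ("D", none), ("E", none)]
           match PySem.Dict.get? masks cls with
           | none => ("", none)
           | some sm => (cls, sm)) := by
  by_cases hr : 0 ≤ f ∧ f ≤ 255
  · simp only [hr]
    have hn : f = ((f.toNat : Nat) : Int) := by omega
    have hlt : f.toNat < 256 := by omega
    rw [hn]
    revert hlt
    have : ∀ n : Nat, n < 256 →
        findClass (n : Int)
          [((0, 127), "A", some "255.0.0.0"),
           ((128, 191), "B", some "255.255.0.0"),
           ((192, 223), "C", some "255.255.255.0"),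
           ((224, 239), "D", none),
           ((240, 255), "E", none)] =
        (match PySem.Str.pyGet? "AAAAAAAABBBBCCDE" ((n : Int) >>> 4) with
         | none => ("", none)
         | some c =>
             let cls := String.ofList [c]
             let masks : PySem.Dict String (Option String) :=
               PySem.Dict.ofList
                 [("A", some "255.0.0.0"), ("B", some "255.255.0.0"),
                  ("C", some "255.255.255.0"), ("D", none), ("E", none)]
             match PySem.Dict.get? masks cls with
             | none => ("", none)
             | some sm => (cls, sm)) := by decide
    exact this f.toNat
  · simp only [hr, not_false_iff, if_true]
    simp only [findClass]
    rcases not_and_or.mp hr with h | h <;>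
      (repeat rw [if_neg (by omega)])

-- ===== VERDICT (by name: the statement is the Claim_ definition above) =====
theorem generate_spec : Claim_equal_generate := by
  intro data _ hpre
  obtain ⟨hne, hall⟩ := hpre
  unfold Spec_generate generate generate_alt
  have hm : ∃ ints, data.mapM PySem.Int.ofStr? = some ints ∧ ints ≠ [] := by
    obtain ⟨s0, rest, rfl⟩ := List.exists_cons_of_ne_nil hne
    obtain ⟨v0, hv0⟩ := Option.isSome_iff_exists.mp (hall s0 (by simp))
    have : ∀ l : List String, (∀ s ∈ l, (PySem.Int.ofStr? s).isSome = true) →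
        ∃ vs, l.mapM PySem.Int.ofStr? = some vs := by
      intro l hl
      induction l with
      | nil => exact ⟨[], rfl⟩
      | cons x xs ih =>
        obtain ⟨v, hv⟩ := Option.isSome_iff_exists.mp (hl x (by simp))
        obtain ⟨vs, hvs⟩ := ih (fun s hs => hl s (by simp [hs]))
        exact ⟨v :: vs, by simp [List.mapM_cons, hv, hvs]⟩
    obtain ⟨vs, hvs⟩ := this rest (fun s hs => hall s (by simp [hs]))
    exact ⟨v0 :: vs, by simp [List.mapM_cons, hv0, hvs], by simp⟩
  obtain ⟨ints, hm, hne'⟩ := hm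
  obtain ⟨f, fs, rfl⟩ := List.exists_cons_of_ne_nil hne'
  simp only [hm, PySem.List.pyGet?_zero_cons]
  exact findClass_eq_lookup f
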